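-- pv_equiv track=rewrite | github.com/JakeRoggenbuck/advent-of-code | 2024/02/day_two_p2.py | check_invalid
-- ===== SOURCE A (Python) =====
-- def check_invalid(line):
--     i = 0
--     is_inc = None
--
--     invalid = 0
--     invalid_indexes = []
--
--     while i < len(line) - 1:
--         if line[i] == line[i + 1]:
--             invalid += 1
--             invalid_indexes.append(i)
--             i += 1
--             continue
--
--         if line[i] < line[i + 1]:
--             if abs(line[i] - line[i + 1]) > 3:
--                 invalid += 1
--                 invalid_indexes.append(i)
--                 i += 1
--                 continue
--
--             if is_inc is None:
--                 is_inc = True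
--             else:
--                 if not is_inc:
--                     invalid += 1
--                     invalid_indexes.append(i)
--                     i += 1
--                     continue
--
--         if line[i] > line[i + 1]:
--             if abs(line[i] - line[i + 1]) > 3:
--                 invalid += 1
--                 invalid_indexes.append(i)
--                 i += 1
--                 continue
--
--             if is_inc is None:
--                 is_inc = False
--             else:
--                 if is_inc:
--                     invalid += 1
--                     invalid_indexes.append(i)
--                     i += 1
--                     continue
--
--         i += 1
--
--     return invalid, invalid_indexes
-- ===== SOURCE B (Python) =====
-- def check_invalid(line):
--     # first pass: direction from the earliest adjacent pair whose gap is between 1 and 3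
--     is_inc = None
--     for a, b in zip(line, line[1:]):
--         if 1 <= abs(a - b) <= 3:
--             is_inc = a < b
--             break
--     # second pass: flag every pair that is equal, too steep, or against that direction
--     invalid_indexes = []
--     i = 0
--     for a, b in zip(line, line[1:]):
--         if a == b or abs(a - b) > 3 or (a < b) != is_inc:
--             invalid_indexes.append(i)
--         i += 1
--     return len(invalid_indexes), invalid_indexes
-- ===== Notes on version B (the rewrite author's own statement) =====
-- stated objective: simpler
-- what changed: Replaces A's single while-loop with an evolving Optional direction state and continue-laden branch ladder by a two-pass decomposition: one scan fixes the direction from the earliest pair with gap between 1 and 3, then a plain validation pass flags equal, too-steep or wrong-direction pairs.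
import Mathlib
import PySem

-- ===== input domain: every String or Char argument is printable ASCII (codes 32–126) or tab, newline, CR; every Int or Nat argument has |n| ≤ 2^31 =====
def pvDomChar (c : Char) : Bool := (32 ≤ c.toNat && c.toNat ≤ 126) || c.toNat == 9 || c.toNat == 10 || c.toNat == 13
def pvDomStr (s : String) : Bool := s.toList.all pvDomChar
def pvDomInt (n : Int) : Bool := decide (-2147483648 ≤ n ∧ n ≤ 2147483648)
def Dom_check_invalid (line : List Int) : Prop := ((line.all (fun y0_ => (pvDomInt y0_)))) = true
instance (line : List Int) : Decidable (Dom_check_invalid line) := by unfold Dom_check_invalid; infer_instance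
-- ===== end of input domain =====

-- B replaces A's single loop with mutating direction state by a determine-direction-then-validate
-- two-pass decomposition (objective: simpler; same O(n) cost).

-- ===== PORT A =====
-- A's while-loop over i with state (is_inc, invalid, invalid_indexes); the window line[i], line[i+1]
-- becomes structural recursion on a :: b :: rest, branches in A's order.
def check_invalid_loop : List Int → Int → Option Bool → Int → List Int → Int × List Int
  | a :: b :: rest, i, inc, invalid, idxs =>
    if a = b then
      check_invalid_loop (b :: rest) (i + 1) inc (invalid + 1) (idxs ++ [i])
    else if a < b then
      if (a - b).natAbs > 3 then
        check_invalid_loop (b :: rest) (i + 1) inc (invalid + 1) (idxs ++ [i])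
      else
        match inc with
        | none => check_invalid_loop (b :: rest) (i + 1) (some true) invalid idxs
        | some v =>
          if ¬ v then check_invalid_loop (b :: rest) (i + 1) (some v) (invalid + 1) (idxs ++ [i])
          else check_invalid_loop (b :: rest) (i + 1) (some v) invalid idxs
    else -- here a > b (not equal, not less)
      if (a - b).natAbs > 3 then
        check_invalid_loop (b :: rest) (i + 1) inc (invalid + 1) (idxs ++ [i])
      else
        match inc with
        | none => check_invalid_loop (b :: rest) (i + 1) (some false) invalid idxs
        | some v =>
          if v then check_invalid_loop (b :: rest) (i + 1) (some v) (invalid + 1) (idxs ++ [i])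
          else check_invalid_loop (b :: rest) (i + 1) (some v) invalid idxs
  | _, _, _, invalid, idxs => (invalid, idxs)

def check_invalid (line : List Int) : Int × List Int :=
  check_invalid_loop line 0 none 0 []

-- ===== PORT B =====
-- first pass of Source B: direction from the earliest adjacent pair whose gap is between 1 and 3
def cia_dir : List Int → Option Bool
  | a :: b :: rest =>
    if 1 ≤ (a - b).natAbs ∧ (a - b).natAbs ≤ 3 then some (decide (a < b))
    else cia_dir (b :: rest)
  | _ => none

-- second pass of Source B: flag every pair that is equal, too steep, or against that direction
def cia_scan (inc : Option Bool) : List Int → Int → List Int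
  | a :: b :: rest, i =>
    (if a = b ∨ (a - b).natAbs > 3 ∨ some (decide (a < b)) ≠ inc then [i] else []) ++
      cia_scan inc (b :: rest) (i + 1)
  | _, _ => []

def check_invalid_alt (line : List Int) : Int × List Int :=
  let idxs := cia_scan (cia_dir line) line 0
  ((idxs.length : Int), idxs)

-- ===== PRECONDITION & SPEC =====
def Spec_check_invalid (line : List Int) (out : Int × List Int) : Prop := out = check_invalid_alt line
instance (line : List Int) (out : Int × List Int) : Decidable (Spec_check_invalid line out) := by unfold Spec_check_invalid; infer_instance

-- ===== CLAIM (what is proved, stated in full; the proofs are below) =====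
def Claim_equal_check_invalid : Prop := ∀ (line : List Int), Dom_check_invalid line → Spec_check_invalid line (check_invalid line)

-- ===== LEMMAS AND PROOFS =====

-- Once A's direction state is fixed at `some v`, the rest of its loop flags exactly
-- what B's validation pass flags with `inc = some v`.
theorem loop_some (l : List Int) : ∀ (i : Int) (v : Bool) (invalid : Int) (idxs : List Int),
    check_invalid_loop l i (some v) invalid idxs
      = (invalid + (cia_scan (some v) l i).length, idxs ++ cia_scan (some v) l i) := by
  induction l with
  | nil => intro i v invalid idxs; simp [check_invalid_loop, cia_scan]
  | cons a t ih =>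
    intro i v invalid idxs
    cases t with
    | nil => simp [check_invalid_loop, cia_scan]
    | cons b rest =>
      by_cases hab : a = b
      · simp [check_invalid_loop, cia_scan, hab, ih]
        omega
      · by_cases hlt : a < b
        · by_cases hgap : (a - b).natAbs > 3
          · simp [check_invalid_loop, cia_scan, hab, hlt, hgap, ih]
            omega
          · cases v with
            | false =>
              simp [check_invalid_loop, cia_scan, hab, hlt, hgap, ih]
              omega
            | true =>
              simp [check_invalid_loop, cia_scan, hab, hlt, hgap, ih]
        · by_cases hgap : (a - b).natAbs > 3
          · simp [check_invalid_loop, cia_scan, hab, hlt, hgap, ih]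
            omega
          · cases v with
            | true =>
              simp [check_invalid_loop, cia_scan, hab, hlt, hgap, ih]
              omega
            | false =>
              simp [check_invalid_loop, cia_scan, hab, hlt, hgap, ih]

-- While A's direction state is still none, its loop agrees with B's validation pass
-- run with the direction B computes from the remaining list.
theorem loop_none (l : List Int) : ∀ (i : Int) (invalid : Int) (idxs : List Int),
    check_invalid_loop l i none invalid idxs
      = (invalid + (cia_scan (cia_dir l) l i).length, idxs ++ cia_scan (cia_dir l) l i) := by
  induction l with
  | nil => intro i invalid idxs; simp [check_invalid_loop, cia_scan]
  | cons a t ih =>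
    intro i invalid idxs
    cases t with
    | nil => simp [check_invalid_loop, cia_scan]
    | cons b rest =>
      by_cases hab : a = b
      · have h1 : ¬ (1 ≤ (a - b).natAbs ∧ (a - b).natAbs ≤ 3) := by
          simp [hab]
        simp [check_invalid_loop, cia_dir, cia_scan, hab, h1, ih]
        omega
      · by_cases hgap : (a - b).natAbs > 3
        · have h1 : ¬ (1 ≤ (a - b).natAbs ∧ (a - b).natAbs ≤ 3) := by omega
          by_cases hlt : a < b <;>
            simp [check_invalid_loop, cia_dir, cia_scan, hab, h1, hgap, hlt, ih] <;> omega
        · have hne : (a - b).natAbs ≥ 1 := by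
            rcases Int.natAbs_eq (a - b) with h | h <;> omega
          have h1 : 1 ≤ (a - b).natAbs ∧ (a - b).natAbs ≤ 3 := by omega
          by_cases hlt : a < b
          · simp [check_invalid_loop, cia_dir, cia_scan, hab, h1, hgap, hlt, loop_some]
          · simp [check_invalid_loop, cia_dir, cia_scan, hab, h1, hgap, hlt, loop_some]

-- ===== VERDICT (by name: the statement is the Claim_ definition above) =====
theorem check_invalid_spec : Claim_equal_check_invalid := by
  intro line _
  unfold Spec_check_invalid check_invalid check_invalid_alt
  simp [loop_none]
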